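-- pv_equiv track=rewrite | github.com/Yujun-Won/codetree-TILs | 231111/함수를 이용한 온전수 판별/determining-the-whole-number-using-a-function.py | count_magic_number
-- ===== SOURCE A (Python) =====
-- def count_magic_number(a, b):
--     cnt = 0
--     for i in range(a, b+1):
--         if i % 2 == 0 or i % 10 == 5 or (i % 3 == 0 and i % 9 != 0):
--             continue
--         else:
--             cnt += 1
--     return cnt
-- ===== SOURCE B (Python) =====
-- # O(1) closed form: the test depends only on i mod 90, so count via a
-- # precomputed prefix table over one period and floor-division arithmetic.
-- _PREF = [0]
-- for _r in range(90):
--     _PREF.append(_PREF[-1] + (1 if (_r % 2 == 1 and _r % 10 != 5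
--                                     and (_r % 3 != 0 or _r % 9 == 0)) else 0))
--
-- def _F(m):
--     # number of "magic" integers in [0, m) (signed count for negative m)
--     return (m // 90) * _PREF[90] + _PREF[m % 90]
--
-- def count_magic_number(a, b):
--     if b < a:
--         return 0
--     return _F(b + 1) - _F(a)
-- ===== Notes on version B (the rewrite author's own statement) =====
-- stated objective: faster
-- what changed: A scans every integer in [a,b] testing each; B exploits that the test is periodic with period 90 and computes the count from a precomputed 90-entry prefix table and floor division (intended as faster on large ranges; measured ~36x at the largest timing size, ties on small ranges).
import Mathlib
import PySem

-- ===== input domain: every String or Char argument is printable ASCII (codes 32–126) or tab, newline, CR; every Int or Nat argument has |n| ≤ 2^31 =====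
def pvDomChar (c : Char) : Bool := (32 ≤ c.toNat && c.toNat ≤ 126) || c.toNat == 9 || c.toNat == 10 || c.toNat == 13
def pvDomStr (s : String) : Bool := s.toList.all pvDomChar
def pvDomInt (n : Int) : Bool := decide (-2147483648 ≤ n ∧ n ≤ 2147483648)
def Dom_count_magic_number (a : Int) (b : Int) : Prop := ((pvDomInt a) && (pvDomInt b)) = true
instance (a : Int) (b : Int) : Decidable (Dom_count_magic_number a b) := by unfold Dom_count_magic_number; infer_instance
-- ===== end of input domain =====

-- B replaces A's per-integer scan of [a,b] by a closed form using the period-90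
-- periodicity of the test (prefix table + floor division); intended as faster on
-- large ranges (measured ~36x at the largest timing size; inputs with small b-a tie).

-- ===== PORT A =====
def count_magic_number (a : Int) (b : Int) : Int :=
  (PySem.List.pyRange a (b + 1) 1).foldl
    (fun cnt i =>
      if PySem.Int.mod i 2 == 0 || PySem.Int.mod i 10 == 5 ||
         (PySem.Int.mod i 3 == 0 && PySem.Int.mod i 9 != 0) then cnt
      else cnt + 1) 0

-- ===== PORT B =====
-- module-level table _PREF of Source B, built by the same loop
def pvPref : List Int :=
  (PySem.List.pyRange 0 90 1).foldl
    (fun p r =>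
      p ++ [PySem.List.pyGetD p (-1) 0 +
        (if PySem.Int.mod r 2 == 1 && PySem.Int.mod r 10 != 5 &&
            (PySem.Int.mod r 3 != 0 || PySem.Int.mod r 9 == 0) then 1 else 0)])
    [0]

-- helper _F of Source B
def pvF (m : Int) : Int :=
  PySem.Int.floordiv m 90 * PySem.List.pyGetD pvPref 90 0 +
    PySem.List.pyGetD pvPref (PySem.Int.mod m 90) 0

def count_magic_number_alt (a : Int) (b : Int) : Int :=
  if b < a then 0 else pvF (b + 1) - pvF a

-- ===== PRECONDITION & SPEC =====
def Spec_count_magic_number (a : Int) (b : Int) (out : Int) : Prop := out = count_magic_number_alt a b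
instance (a : Int) (b : Int) (out : Int) : Decidable (Spec_count_magic_number a b out) := by unfold Spec_count_magic_number; infer_instance

-- ===== CLAIM (what is proved, stated in full; the proofs are below) =====
def Claim_equal_count_magic_number : Prop := ∀ (a : Int) (b : Int), Dom_count_magic_number a b → Spec_count_magic_number a b (count_magic_number a b)

-- ===== LEMMAS AND PROOFS =====

-- A's per-element increment
def pvInd (i : Int) : Int :=
  if PySem.Int.mod i 2 == 0 || PySem.Int.mod i 10 == 5 ||
     (PySem.Int.mod i 3 == 0 && PySem.Int.mod i 9 != 0) then 0 else 1

lemma pvInd_emod (i : Int) : pvInd i = pvInd (i % 90) := by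
  unfold pvInd
  rw [PySem.Int.mod_eq_emod_of_pos (a := i) (by norm_num : (0:Int) < 2),
      PySem.Int.mod_eq_emod_of_pos (a := i) (by norm_num : (0:Int) < 10),
      PySem.Int.mod_eq_emod_of_pos (a := i) (by norm_num : (0:Int) < 3),
      PySem.Int.mod_eq_emod_of_pos (a := i) (by norm_num : (0:Int) < 9),
      PySem.Int.mod_eq_emod_of_pos (a := i % 90) (by norm_num : (0:Int) < 2),
      PySem.Int.mod_eq_emod_of_pos (a := i % 90) (by norm_num : (0:Int) < 10),
      PySem.Int.mod_eq_emod_of_pos (a := i % 90) (by norm_num : (0:Int) < 3),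
      PySem.Int.mod_eq_emod_of_pos (a := i % 90) (by norm_num : (0:Int) < 9)]
  have h2 : i % 90 % 2 = i % 2 := by omega
  have h10 : i % 90 % 10 = i % 10 := by omega
  have h3 : i % 90 % 3 = i % 3 := by omega
  have h9 : i % 90 % 9 = i % 9 := by omega
  rw [h2, h10, h3, h9]

-- prefix-table step, checked on the 90 residues by computation
set_option maxRecDepth 100000 in
lemma pvPref_step (r : Nat) (hr : r < 90) :
    PySem.List.pyGetD pvPref ((r : Int) + 1) 0 =
      PySem.List.pyGetD pvPref (r : Int) 0 + pvInd (r : Int) := by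
  revert hr; revert r; decide

-- the key telescoping fact: pvF m + pvInd m = pvF (m + 1)
set_option maxRecDepth 100000 in
lemma pvF_succ (m : Int) : pvF (m + 1) = pvF m + pvInd m := by
  unfold pvF
  rw [PySem.Int.mod_eq_emod_of_pos (a := m) (by norm_num : (0:Int) < 90),
      PySem.Int.mod_eq_emod_of_pos (a := m + 1) (by norm_num : (0:Int) < 90),
      PySem.Int.floordiv_eq_ediv_of_pos (a := m) (by norm_num : (0:Int) < 90),
      PySem.Int.floordiv_eq_ediv_of_pos (a := m + 1) (by norm_num : (0:Int) < 90)]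
  have hr0 : 0 ≤ m % 90 := Int.emod_nonneg m (by norm_num)
  have hr1 : m % 90 < 90 := Int.emod_lt_of_pos m (by norm_num)
  rw [pvInd_emod m]
  by_cases h89 : m % 90 = 89
  · have hq : (m + 1) / 90 = m / 90 + 1 := by omega
    have hr : (m + 1) % 90 = 0 := by omega
    rw [hq, hr, h89]
    have h90 : PySem.List.pyGetD pvPref 90 0 = 28 := by decide
    have h0 : PySem.List.pyGetD pvPref 0 0 = 0 := by decide
    have h89v : PySem.List.pyGetD pvPref 89 0 + pvInd 89 = 28 := by decide
    rw [h90, h0]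
    omega
  · have hq : (m + 1) / 90 = m / 90 := by omega
    have hr : (m + 1) % 90 = m % 90 + 1 := by omega
    rw [hq, hr]
    have := pvPref_step (m % 90).toNat (by omega)
    rw [Int.toNat_of_nonneg hr0] at this
    rw [this]
    ring

-- A's fold written with pvInd, over pyRange a (a + n) 1, telescopes
lemma pvFold_eq (n : Nat) (a : Int) :
    (PySem.List.pyRange a (a + n) 1).foldl
      (fun cnt i =>
        if PySem.Int.mod i 2 == 0 || PySem.Int.mod i 10 == 5 ||
           (PySem.Int.mod i 3 == 0 && PySem.Int.mod i 9 != 0) then cnt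
        else cnt + 1) 0 = pvF (a + n) - pvF a := by
  induction n with
  | zero =>
    rw [show ((0:Nat):Int) = 0 from rfl, add_zero,
        PySem.List.pyRange_one_eq_nil le_rfl]
    exact (sub_self _).symm
  | succ k ih =>
    have hsplit : (a + (k + 1 : Nat) : Int) = (a + k) + 1 := by push_cast; ring
    rw [hsplit, PySem.List.pyRange_one_succ_right (by omega : a ≤ a + (k:Nat)),
        List.foldl_append, ih, pvF_succ]
    simp only [List.foldl_cons, List.foldl_nil]
    unfold pvInd
    split_ifs with h <;> ring

-- ===== VERDICT (by name: the statement is the Claim_ definition above) =====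
theorem count_magic_number_spec : Claim_equal_count_magic_number := by
  intro a b _
  unfold Spec_count_magic_number count_magic_number count_magic_number_alt
  by_cases hba : b < a
  · rw [if_pos hba, PySem.List.pyRange_one_eq_nil (by omega)]
    rfl
  · rw [if_neg hba]
    have hn : b + 1 = a + ((b + 1 - a).toNat : Int) := by omega
    calc (PySem.List.pyRange a (b + 1) 1).foldl _ 0
        = (PySem.List.pyRange a (a + ((b + 1 - a).toNat : Int)) 1).foldl
            (fun cnt i =>
              if PySem.Int.mod i 2 == 0 || PySem.Int.mod i 10 == 5 ||
                 (PySem.Int.mod i 3 == 0 && PySem.Int.mod i 9 != 0) then cnt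
              else cnt + 1) 0 := by rw [← hn]
      _ = pvF (a + ((b + 1 - a).toNat : Int)) - pvF a := pvFold_eq _ a
      _ = pvF (b + 1) - pvF a := by rw [← hn]
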